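-- pv_equiv track=rewrite | github.com/minhprovjp/UEBA-Platform | MA-sim/query_complexity_engine.py | add_realistic_joins
-- ===== SOURCE A (Python) =====
-- from typing import Dict, List, Optional, Tuple
--
-- def add_realistic_joins(base_query: str, available_tables: List[str],
--                       max_joins: int) -> str:
--     """Add realistic joins to base query"""
--     if max_joins == 0 or not available_tables:
--         return base_query
--
--     # Simple join addition logic
--     enhanced_query = base_query
--
--     # Add common business joins
--     join_patterns = {
--         'customers': 'LEFT JOIN orders ON customers.customer_id = orders.customer_id',
--         'orders': 'LEFT JOIN order_items ON orders.order_id = order_items.order_id',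
--         'employees': 'LEFT JOIN departments ON employees.dept_id = departments.dept_id',
--         'products': 'LEFT JOIN product_categories ON products.category_id = product_categories.category_id'
--     }
--
--     joins_added = 0
--     for table in available_tables:
--         if joins_added >= max_joins:
--             break
--         if table in join_patterns and table in base_query:
--             join_clause = join_patterns[table]
--             if join_clause not in enhanced_query:
--                 # Insert join after FROM clause
--                 from_pos = enhanced_query.upper().find('FROM')
--                 if from_pos != -1:
--                     # Find end of FROM table
--                     from_end = enhanced_query.find(' ', from_pos + 5)
--                     if from_end != -1:
--                         enhanced_query = (enhanced_query[:from_end] +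
--                                         f' {join_clause}' +
--                                         enhanced_query[from_end:])
--                         joins_added += 1
--
--     return enhanced_query
-- ===== SOURCE B (Python) =====
-- from typing import Dict, List, Optional, Tuple
--
-- def add_realistic_joins(base_query: str, available_tables: List[str],
--                       max_joins: int) -> str:
--     """Add realistic joins to base query (split-once / assemble-once re-implementation)."""
--     join_patterns = {
--         'customers': 'LEFT JOIN orders ON customers.customer_id = orders.customer_id',
--         'orders': 'LEFT JOIN order_items ON orders.order_id = order_items.order_id',
--         'employees': 'LEFT JOIN departments ON employees.dept_id = departments.dept_id',
--         'products': 'LEFT JOIN product_categories ON products.category_id = product_categories.category_id'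
--     }
--
--     # Locate the insertion point once: the first space after the FROM table.
--     from_pos = base_query.upper().find('FROM')
--     if from_pos == -1:
--         return base_query
--     from_end = base_query.find(' ', from_pos + 5)
--     if from_end == -1:
--         return base_query
--     head, tail = base_query[:from_end], base_query[from_end:]
--
--     # Scan the tables, keeping the inserted clauses as a list (most recent first);
--     # a clause is added only if it is not already in the query built so far.
--     inserted: List[str] = []
--     for table in available_tables:
--         if len(inserted) >= max_joins:
--             break
--         clause = join_patterns.get(table)
--         if clause is not None and table in base_query:
--             current = head + ''.join(' ' + c for c in inserted) + tail
--             if clause not in current: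
--                 inserted.insert(0, clause)
--
--     # Assemble the result once.
--     return head + ''.join(' ' + c for c in inserted) + tail
-- ===== Notes on version B (the rewrite author's own statement) =====
-- stated objective: alternative
-- what changed: A re-locates the FROM clause and re-splices the whole query string on every insertion inside the scan; B locates the insertion point once up front (returning early if there is none), splits the query into head/tail, accumulates the inserted clauses in a list during the scan, and assembles the result string once at the end.
import Mathlib
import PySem

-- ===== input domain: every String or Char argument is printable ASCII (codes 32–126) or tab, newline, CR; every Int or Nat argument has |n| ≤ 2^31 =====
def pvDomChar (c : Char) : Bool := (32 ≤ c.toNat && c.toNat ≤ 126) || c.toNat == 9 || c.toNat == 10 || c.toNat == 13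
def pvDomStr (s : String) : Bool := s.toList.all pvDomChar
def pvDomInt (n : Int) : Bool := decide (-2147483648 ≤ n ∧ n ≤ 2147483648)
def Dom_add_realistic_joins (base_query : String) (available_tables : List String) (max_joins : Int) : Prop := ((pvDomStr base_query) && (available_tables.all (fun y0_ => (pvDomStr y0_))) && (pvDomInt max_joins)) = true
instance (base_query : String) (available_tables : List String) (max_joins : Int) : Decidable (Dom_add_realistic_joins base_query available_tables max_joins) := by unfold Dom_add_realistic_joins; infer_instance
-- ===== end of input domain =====

-- B replaces A's insert-as-you-scan loop (which re-finds the FROM position and re-splices the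
-- whole query string on every insertion) by: locate the splice point once, split the query into
-- head/tail, collect the inserted clauses in a list, and assemble the result once at the end.

-- ===== PORT A =====
def pvJoinPatterns : PySem.Dict String String := PySem.Dict.ofList
  [("customers", "LEFT JOIN orders ON customers.customer_id = orders.customer_id"),
   ("orders", "LEFT JOIN order_items ON orders.order_id = order_items.order_id"),
   ("employees", "LEFT JOIN departments ON employees.dept_id = departments.dept_id"),
   ("products", "LEFT JOIN product_categories ON products.category_id = product_categories.category_id")]

-- the body of A's `if join_clause not in enhanced_query:` branch
def pvInsertA (enh : List Char) (jc : List Char) (ja : Int) : List Char × Int :=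
  let from_pos := PySem.Chars.find (PySem.Chars.upper enh) "FROM".toList
  if from_pos ≠ -1 then
    let from_end := PySem.Chars.findFrom enh " ".toList (from_pos + 5)
    if from_end ≠ -1 then
      (PySem.Chars.slice enh none (some from_end) ++ (' ' :: jc) ++
         PySem.Chars.slice enh (some from_end) none, ja + 1)
    else (enh, ja)
  else (enh, ja)

-- A's `for table in available_tables:` loop, state = (enhanced_query, joins_added)
def pvLoopA (base : List Char) (maxJ : Int) : List String → List Char → Int → List Char
  | [], enh, _ => enh
  | t :: ts, enh, ja =>
    if ja ≥ maxJ then enh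
    else
      match PySem.Dict.get? pvJoinPatterns t with
      | none => pvLoopA base maxJ ts enh ja
      | some jc =>
        if PySem.Chars.isIn t.toList base then
          if PySem.Chars.isIn jc.toList enh then pvLoopA base maxJ ts enh ja
          else
            let r := pvInsertA enh jc.toList ja
            pvLoopA base maxJ ts r.1 r.2
        else pvLoopA base maxJ ts enh ja

def add_realistic_joins (base_query : String) (available_tables : List String) (max_joins : Int) : String :=
  if max_joins = 0 ∨ available_tables = [] then base_query
  else String.ofList (pvLoopA base_query.toList max_joins available_tables base_query.toList 0)

-- ===== PORT B =====
-- ''.join(' ' + c for c in inserted)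
def pvIns : List (List Char) → List Char
  | [] => []
  | c :: cs => ' ' :: (c ++ pvIns cs)

-- B's `for table in available_tables:` loop; state = inserted (most recent first)
def pvLoopB (b head tail : List Char) (maxJ : Int) : List String → List (List Char) → List (List Char)
  | [], ins => ins
  | t :: ts, ins =>
    if PySem.List.len ins ≥ maxJ then ins
    else
      match PySem.Dict.get? pvJoinPatterns t with
      | none => pvLoopB b head tail maxJ ts ins
      | some c =>
        if PySem.Chars.isIn t.toList b then
          if PySem.Chars.isIn c.toList (head ++ pvIns ins ++ tail) then
            pvLoopB b head tail maxJ ts ins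
          else pvLoopB b head tail maxJ ts (c.toList :: ins)
        else pvLoopB b head tail maxJ ts ins

def add_realistic_joins_alt (base_query : String) (available_tables : List String) (max_joins : Int) : String :=
  let b := base_query.toList
  let from_pos := PySem.Chars.find (PySem.Chars.upper b) "FROM".toList
  if from_pos = -1 then base_query
  else
    let from_end := PySem.Chars.findFrom b " ".toList (from_pos + 5)
    if from_end = -1 then base_query
    else
      let head := PySem.Chars.slice b none (some from_end)
      let tail := PySem.Chars.slice b (some from_end) none
      let ins := pvLoopB b head tail max_joins available_tables []
      String.ofList (head ++ pvIns ins ++ tail)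

-- ===== PRECONDITION & SPEC =====
def Spec_add_realistic_joins (base_query : String) (available_tables : List String) (max_joins : Int) (out : String) : Prop := out = add_realistic_joins_alt base_query available_tables max_joins
instance (base_query : String) (available_tables : List String) (max_joins : Int) (out : String) : Decidable (Spec_add_realistic_joins base_query available_tables max_joins out) := by unfold Spec_add_realistic_joins; infer_instance

-- ===== CLAIM (what is proved, stated in full; the proofs are below) =====
def Claim_equal_add_realistic_joins : Prop := ∀ (base_query : String) (available_tables : List String) (max_joins : Int), Dom_add_realistic_joins base_query available_tables max_joins → Spec_add_realistic_joins base_query available_tables max_joins (add_realistic_joins base_query available_tables max_joins)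

-- ===== LEMMAS AND PROOFS =====

-- the enhanced query after the clauses in ins (most recent first) were spliced in at p
def pvE (b : List Char) (p : Nat) (ins : List (List Char)) : List Char :=
  b.take p ++ pvIns ins ++ b.drop p

lemma pvE_nil (b : List Char) (p : Nat) : pvE b p [] = b := by
  simp [pvE, pvIns]

-- proof-side helper: the splice position as A computes it
def pvInsPoint (b : List Char) : Option Nat :=
  let fp := PySem.Chars.find (PySem.Chars.upper b) "FROM".toList
  if fp = -1 then none
  else
    let fe := PySem.Chars.findFrom b " ".toList (fp + 5)
    if fe = -1 then none else some fe.toNat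

lemma pvInsertA_noPos (b : List Char) (jc : List Char) (ja : Int) (h : pvInsPoint b = none) :
    pvInsertA b jc ja = (b, ja) := by
  simp only [pvInsertA]
  split_ifs with hA hB
  · exfalso
    simp only [pvInsPoint] at h
    rw [if_neg hA] at h
    by_cases hfe : PySem.Chars.findFrom b " ".toList
        (PySem.Chars.find (PySem.Chars.upper b) "FROM".toList + 5) = -1
    · exact hB hfe
    · rw [if_neg hfe] at h; simp at h
  · rfl
  · rfl

-- the quirk: a start past the end gives -1
lemma pv_findFrom_past (b sub : List Char) (k : Nat) (h : b.length < k) :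
    PySem.Chars.findFrom b sub (k : Int) = -1 := by
  simp only [PySem.Chars.findFrom]
  have h1 : ¬ ((k : Int) < 0) := by omega
  have h2 : (b.length : Int) < (k : Int) := by exact_mod_cast h
  simp [h1, h2]

-- unpacking pvInsPoint
lemma pvInsPoint_spec (b : List Char) (p : Nat) (h : pvInsPoint b = some p) :
    ∃ fpn : Nat, PySem.Chars.find (PySem.Chars.upper b) "FROM".toList = (fpn : Int) ∧
      PySem.Chars.findFrom b " ".toList ((fpn : Int) + 5) = (p : Int) ∧
      fpn + 5 ≤ p ∧ p < b.length := by
  simp only [pvInsPoint] at h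
  split_ifs at h with h1 h2
  have hge := PySem.Chars.neg_one_le_find (PySem.Chars.upper b) "FROM".toList
  set fpI := PySem.Chars.find (PySem.Chars.upper b) "FROM".toList with hfpI
  have hnn : 0 ≤ fpI := by omega
  obtain ⟨hFocc, _⟩ := PySem.Chars.find_spec (s := PySem.Chars.upper b)
    (sub := "FROM".toList) (hfpI ▸ hnn)
  rw [← hfpI] at hFocc
  have hFlen : fpI.toNat + 4 ≤ b.length := by
    have hle := hFocc.length_le
    rw [List.length_drop] at hle
    have hub : (PySem.Chars.upper b).length = b.length := by simp [PySem.Chars.upper]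
    have hF4 : ("FROM".toList).length = 4 := rfl
    omega
  by_cases hk : fpI.toNat + 5 ≤ b.length
  · have hcast : fpI + 5 = ((fpI.toNat + 5 : Nat) : Int) := by omega
    obtain ⟨hge2, hSocc, hSmin⟩ := PySem.Chars.findFrom_natCast_spec b " ".toList
      (fpI.toNat + 5) hk (by rw [← hcast]; exact h2)
    rw [← hcast] at hge2 hSocc
    set feI := PySem.Chars.findFrom b " ".toList (fpI + 5) with hfeI
    have hpeq : feI.toNat = p := Option.some.inj h
    have hfe0 : 0 ≤ feI := by omega
    have hplen : p < b.length := by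
      have hle := hSocc.length_le
      rw [List.length_drop] at hle
      have hS1 : (" ".toList).length = 1 := rfl
      omega
    refine ⟨fpI.toNat, by omega, ?_, by omega, hplen⟩
    rw [show ((fpI.toNat : Int)) = fpI by omega]
    rw [← hfeI]
    omega
  · exfalso
    have hpast := pv_findFrom_past b " ".toList (fpI.toNat + 5) (by omega)
    rw [show ((fpI.toNat + 5 : Nat) : Int) = fpI + 5 by omega] at hpast
    exact h2 hpast

-- find characterisation
lemma pv_find_eq (l pat : List Char) (n : Nat) (hocc : pat <+: l.drop n)
    (hmin : ∀ i < n, ¬ pat <+: l.drop i) : PySem.Chars.find l pat = (n : Int) := by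
  have hin : PySem.Chars.isIn pat l = true :=
    (PySem.Chars.exists_prefix_drop_iff_isIn pat l).mp ⟨n, hocc⟩
  have hnn : 0 ≤ PySem.Chars.find l pat :=
    (PySem.Chars.find_nonneg_iff l pat).mpr ((PySem.Chars.isIn_iff_infix pat l).mp hin)
  obtain ⟨h1, h2⟩ := PySem.Chars.find_spec hnn
  have : (PySem.Chars.find l pat).toNat = n := by
    rcases Nat.lt_trichotomy (PySem.Chars.find l pat).toNat n with hlt | heq | hgt
    · exact absurd h1 (hmin _ hlt)
    · exact heq
    · exact absurd hocc (h2 n hgt)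
  omega

lemma pv_prefix_window (l m pat : List Char) (i p : Nat) (hlm : l.take p = m.take p)
    (h : i + pat.length ≤ p) : (pat <+: l.drop i) ↔ (pat <+: m.drop i) := by
  have e : ∀ z : List Char, (z.drop i).take pat.length = (z.take (i + pat.length)).drop i := by
    intro z; rw [List.take_drop]; try simp
  have t : ∀ (x y : List Char), x.take p = y.take p →
      x.take (i + pat.length) = y.take (i + pat.length) := by
    intro x y hxy
    have hx : x.take (i + pat.length) = (x.take p).take (i + pat.length) := by
      rw [List.take_take, Nat.min_eq_left h]
    have hy : y.take (i + pat.length) = (y.take p).take (i + pat.length) := by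
      rw [List.take_take, Nat.min_eq_left h]
    rw [hx, hy, hxy]
  have key : ∀ (x y : List Char), x.take p = y.take p → pat <+: x.drop i → pat <+: y.drop i := by
    intro x y hxy hpre
    rw [List.prefix_iff_eq_take] at hpre
    refine List.prefix_iff_eq_take.mpr ?_
    calc pat = (x.drop i).take pat.length := hpre
      _ = (x.take (i + pat.length)).drop i := e x
      _ = (y.take (i + pat.length)).drop i := by rw [t x y hxy]
      _ = (y.drop i).take pat.length := (e y).symm
  exact ⟨key l m hlm, key m l hlm.symm⟩

-- stability: the splice position recomputed on the spliced query is unchanged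
lemma pv_stab (b : List Char) (p fpn : Nat)
    (hfind : PySem.Chars.find (PySem.Chars.upper b) "FROM".toList = (fpn : Int))
    (hff : PySem.Chars.findFrom b " ".toList ((fpn : Int) + 5) = (p : Int))
    (hk5 : fpn + 5 ≤ p) (hplen : p < b.length) (sel : List (List Char)) :
    PySem.Chars.find (PySem.Chars.upper (pvE b p sel)) "FROM".toList = (fpn : Int) ∧
      PySem.Chars.findFrom (pvE b p sel) " ".toList ((fpn : Int) + 5) = (p : Int) := by
  have hFlen : ("FROM".toList).length = 4 := by decide
  have hSlen : (" ".toList).length = 1 := by decide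
  have hlenu : (b.take p).length = p := by simp; omega
  have htake : (pvE b p sel).take p = b.take p := by
    unfold pvE
    rw [List.append_assoc, List.take_append_of_le_length (by omega), List.take_take]
    simp
  have hdropp : (pvE b p sel).drop p = pvIns sel ++ b.drop p := by
    have he : pvE b p sel = b.take p ++ (pvIns sel ++ b.drop p) := by
      rw [pvE, List.append_assoc]
    rw [he, List.drop_append, hlenu]
    simp
  have hlenE : b.length ≤ (pvE b p sel).length := by
    unfold pvE; simp; omega
  obtain ⟨hFocc, hFmin⟩ := PySem.Chars.find_spec (s := PySem.Chars.upper b)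
    (sub := "FROM".toList) (by rw [hfind]; positivity)
  rw [hfind] at hFocc hFmin
  simp only [Int.toNat_natCast] at hFocc hFmin
  have hcast : (fpn : Int) + 5 = ((fpn + 5 : Nat) : Int) := by omega
  obtain ⟨_, hSocc, hSmin⟩ := PySem.Chars.findFrom_natCast_spec b " ".toList (fpn + 5)
    (by omega) (by rw [← hcast, hff]; omega)
  rw [← hcast, hff] at hSocc hSmin
  simp only [Int.toNat_natCast] at hSocc hSmin
  have hutake : (PySem.Chars.upper (pvE b p sel)).take p = (PySem.Chars.upper b).take p := by
    simp only [PySem.Chars.upper, ← List.map_take, htake]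
  constructor
  · apply pv_find_eq
    · exact (pv_prefix_window _ _ _ fpn p hutake (by omega)).mpr hFocc
    · intro i hi
      exact fun hcon => hFmin i hi ((pv_prefix_window _ _ _ i p hutake (by omega)).mp hcon)
  · rw [hcast, PySem.Chars.findFrom_natCast _ _ _ (by omega)]
    have hfind2 : PySem.Chars.find ((pvE b p sel).drop (fpn + 5)) " ".toList
        = ((p - (fpn + 5) : Nat) : Int) := by
      apply pv_find_eq
      · rw [List.drop_drop, show (fpn + 5) + (p - (fpn + 5)) = p by omega, hdropp]
        cases sel with
        | nil => simpa [pvIns] using hSocc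
        | cons x xs =>
          refine ⟨x ++ pvIns xs ++ List.drop p b, ?_⟩
          simp [pvIns]
      · intro i hi hcon
        rw [List.drop_drop] at hcon
        exact hSmin (fpn + 5 + i) (by omega) (by omega)
          ((pv_prefix_window _ _ _ (fpn + 5 + i) p htake (by omega)).mp hcon)
    rw [hfind2]
    have : ¬ (((p - (fpn + 5) : Nat) : Int) = -1) := by omega
    simp only [this, if_false]
    omega

-- A's insertion step on the spliced query
lemma pv_insert_step (b : List Char) (p : Nat) (hp : pvInsPoint b = some p)
    (sel : List (List Char)) (c : List Char) (ja : Int) :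
    pvInsertA (pvE b p sel) c ja = (pvE b p (c :: sel), ja + 1) := by
  obtain ⟨fpn, hfind, hff, hk5, hplen⟩ := pvInsPoint_spec b p hp
  obtain ⟨h1, h2⟩ := pv_stab b p fpn hfind hff hk5 hplen sel
  have hlenu : (b.take p).length = p := by simp; omega
  have htake : (pvE b p sel).take p = b.take p := by
    unfold pvE
    rw [List.append_assoc, List.take_append_of_le_length (by omega), List.take_take]
    simp
  have hdropp : (pvE b p sel).drop p = pvIns sel ++ b.drop p := by
    have he : pvE b p sel = b.take p ++ (pvIns sel ++ b.drop p) := by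
      rw [pvE, List.append_assoc]
    rw [he, List.drop_append, hlenu]
    simp
  unfold pvInsertA
  rw [h1]
  have hne1 : ¬ ((fpn : Int) = -1) := by omega
  rw [if_pos (by simp [hne1])]
  rw [h2]
  have hne2 : ¬ ((p : Int) = -1) := by omega
  rw [if_pos (by simp [hne2])]
  simp only [PySem.Chars.slice_eq_listSlice]
  rw [PySem.List.slice_to _ (by positivity), PySem.List.slice_from _ (by positivity)]
  rw [Int.toNat_natCast, htake, hdropp]
  simp [pvE, pvIns, List.append_assoc]

lemma pvLoopA_break (base : List Char) (maxJ : Int) (ts : List String) (enh : List Char)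
    (ja : Int) (h : ja ≥ maxJ) : pvLoopA base maxJ ts enh ja = enh := by
  cases ts <;> simp [pvLoopA, h]

lemma pvLoopB_break (b head tail : List Char) (maxJ : Int) (ts : List String)
    (ins : List (List Char)) (h : PySem.List.len ins ≥ maxJ) :
    pvLoopB b head tail maxJ ts ins = ins := by
  cases ts with
  | nil => rfl
  | cons t ts => simp only [pvLoopB]; rw [if_pos h]

lemma pvLoopA_noPos (b : List Char) (maxJ : Int) (h : pvInsPoint b = none) :
    ∀ (ts : List String) (ja : Int), pvLoopA b maxJ ts b ja = b := by
  intro ts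
  induction ts with
  | nil => intro ja; rfl
  | cons t ts ih =>
    intro ja
    show pvLoopA b maxJ (t :: ts) b ja = b
    unfold pvLoopA
    by_cases hja : ja ≥ maxJ
    · simp [hja]
    · simp only [if_neg hja]
      cases hget : PySem.Dict.get? pvJoinPatterns t with
      | none => exact ih ja
      | some jc =>
        by_cases ht : PySem.Chars.isIn t.toList b = true
        · simp only [ht, if_true]
          by_cases hc : PySem.Chars.isIn jc.toList b = true
          · simp only [hc, if_true]; exact ih ja
          · simp only [eq_false_of_ne_true hc]
            rw [pvInsertA_noPos b jc.toList ja h]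
            exact ih ja
        · simp only [eq_false_of_ne_true ht]; exact ih ja

-- the two loops stay aligned: A's state is B's state spliced in at p
lemma pv_main (b : List Char) (p : Nat) (hp : pvInsPoint b = some p) (mj : Int) :
    ∀ (ts : List String) (ins : List (List Char)),
      pvLoopA b mj ts (pvE b p ins) ((ins.length : Int)) =
        pvE b p (pvLoopB b (b.take p) (b.drop p) mj ts ins) := by
  intro ts
  induction ts with
  | nil => intro ins; rfl
  | cons t ts ih =>
    intro ins
    by_cases hja : ((ins.length : Int)) ≥ mj
    · rw [pvLoopA_break _ _ _ _ _ hja,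
        pvLoopB_break _ _ _ _ _ _ (by simpa [PySem.List.len_eq] using hja)]
    · have hja' : ¬ PySem.List.len ins ≥ mj := by simpa [PySem.List.len_eq] using hja
      simp only [pvLoopA, pvLoopB, if_neg hja, if_neg hja']
      cases hget : PySem.Dict.get? pvJoinPatterns t with
      | none => exact ih ins
      | some jc =>
        by_cases ht : PySem.Chars.isIn t.toList b = true
        · simp only [ht, if_true]
          have hEeq : (b.take p ++ pvIns ins ++ b.drop p) = pvE b p ins := rfl
          rw [hEeq]
          split_ifs with hc
          · exact ih ins
          · rw [pv_insert_step b p hp ins jc.toList _]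
            have := ih (jc.toList :: ins)
            rw [show ((jc.toList :: ins).length : Int) = (ins.length : Int) + 1 by simp] at this
            exact this
        · simp only [eq_false_of_ne_true ht]; exact ih ins

-- B's result, rephrased through pvInsPoint
lemma pv_alt_noPos (bq : String) (av : List String) (mj : Int)
    (hpos : pvInsPoint bq.toList = none) : add_realistic_joins_alt bq av mj = bq := by
  simp only [add_realistic_joins_alt, pvInsPoint] at hpos ⊢
  by_cases h1 : PySem.Chars.find (PySem.Chars.upper bq.toList) "FROM".toList = -1
  · rw [if_pos h1]
  · rw [if_neg h1] at hpos
    rw [if_neg h1]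
    by_cases h2 : PySem.Chars.findFrom bq.toList " ".toList
        (PySem.Chars.find (PySem.Chars.upper bq.toList) "FROM".toList + 5) = -1
    · rw [if_pos h2]
    · rw [if_neg h2] at hpos
      simp at hpos

lemma pv_alt_pos (bq : String) (av : List String) (mj : Int) (p : Nat)
    (hpos : pvInsPoint bq.toList = some p) :
    add_realistic_joins_alt bq av mj =
      String.ofList (pvE bq.toList p
        (pvLoopB bq.toList (bq.toList.take p) (bq.toList.drop p) mj av [])) := by
  obtain ⟨fpn, hfind, hff, hk5, hplen⟩ := pvInsPoint_spec _ _ hpos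
  simp only [add_realistic_joins_alt]
  rw [hfind, if_neg (show ¬ ((fpn : Int) = -1) by omega), hff,
    if_neg (show ¬ ((p : Int) = -1) by omega)]
  simp only [PySem.Chars.slice_eq_listSlice]
  rw [PySem.List.slice_to _ (by positivity), PySem.List.slice_from _ (by positivity),
    Int.toNat_natCast]
  rfl

-- ===== VERDICT (by name: the statement is the Claim_ definition above) =====
theorem add_realistic_joins_spec : Claim_equal_add_realistic_joins := by
  unfold Claim_equal_add_realistic_joins
  intro bq av mj _hdom
  unfold Spec_add_realistic_joins
  by_cases hguard : mj = 0 ∨ av = []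
  · have hA : add_realistic_joins bq av mj = bq := by
      unfold add_realistic_joins; rw [if_pos hguard]
    have hB : add_realistic_joins_alt bq av mj = bq := by
      cases hpos : pvInsPoint bq.toList with
      | none => exact pv_alt_noPos bq av mj hpos
      | some p =>
        rw [pv_alt_pos bq av mj p hpos]
        have hins : pvLoopB bq.toList (bq.toList.take p) (bq.toList.drop p) mj av [] = [] := by
          rcases hguard with h0 | h0
          · subst h0
            exact pvLoopB_break _ _ _ _ _ _ (by simp [PySem.List.len_eq])
          · subst h0; rfl
        rw [hins, pvE_nil, String.ofList_toList]
    rw [hA, hB]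
  · have hA : add_realistic_joins bq av mj =
        String.ofList (pvLoopA bq.toList mj av bq.toList 0) := by
      unfold add_realistic_joins; rw [if_neg hguard]
    cases hpos : pvInsPoint bq.toList with
    | none =>
      rw [hA, pvLoopA_noPos bq.toList mj hpos av 0, String.ofList_toList,
        pv_alt_noPos bq av mj hpos]
    | some p =>
      rw [hA, pv_alt_pos bq av mj p hpos]
      congr 1
      have := pv_main bq.toList p hpos mj av []
      simpa [pvE_nil] using this
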